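-- pv_equiv track=rewrite | github.com/VDosda/Charly_agent | src/agent/core/planner.py | _scope_is_denied
-- ===== SOURCE A (Python) =====
-- from typing import AbstractSet, Any, Dict, Mapping, Optional, Sequence, Set
--
-- def _scope_is_denied(tool_scopes: AbstractSet[str], denied_scopes: Set[str]) -> bool:
--     for denied in denied_scopes:
--         if denied.endswith("*"):
--             prefix = denied[:-1]
--             if any(scope.startswith(prefix) for scope in tool_scopes):
--                 return True
--             continue
--         if denied in tool_scopes:
--             return True
--     return False
-- ===== SOURCE B (Python) =====
-- def _scope_is_denied(tool_scopes, denied_scopes):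
--     # Index the denials once, then make a single pass over the tool scopes.
--     exact = {d for d in denied_scopes if not d.endswith("*")}
--     prefixes = tuple(d[:-1] for d in denied_scopes if d.endswith("*"))
--     return any(s in exact or s.startswith(prefixes) for s in tool_scopes)
-- ===== Notes on version B (the rewrite author's own statement) =====
-- stated objective: alternative
-- what changed: B swaps the loop nesting: it indexes the denials once (exact denials into a hash set, wildcard prefixes into a tuple) and then makes a single any() pass over the tool scopes, instead of A's loop over denials with an inner scan of all tool scopes per wildcard.
import Mathlib
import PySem

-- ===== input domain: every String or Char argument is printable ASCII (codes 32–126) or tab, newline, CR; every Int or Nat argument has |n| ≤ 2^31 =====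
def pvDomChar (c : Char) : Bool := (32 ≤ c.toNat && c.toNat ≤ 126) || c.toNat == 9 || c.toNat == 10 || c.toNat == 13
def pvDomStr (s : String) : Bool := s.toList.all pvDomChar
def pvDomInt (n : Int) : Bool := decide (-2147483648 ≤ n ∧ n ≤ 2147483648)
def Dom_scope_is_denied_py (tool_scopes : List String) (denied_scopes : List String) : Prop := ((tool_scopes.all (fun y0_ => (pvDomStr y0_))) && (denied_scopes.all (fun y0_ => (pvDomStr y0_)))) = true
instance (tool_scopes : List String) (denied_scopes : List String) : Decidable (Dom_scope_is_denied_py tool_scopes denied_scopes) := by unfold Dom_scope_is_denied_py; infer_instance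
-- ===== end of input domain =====

-- B indexes the denials once (exact denials in a set, wildcard prefixes as a list) and makes a
-- single pass over the tool scopes, instead of A's loop over denials with an inner scan per wildcard.

-- ===== PORT A =====
-- the 'for denied in denied_scopes' loop with its early returns, as structural recursion
def scopeDeniedLoopA (tool_scopes : List String) : List String → Bool
  | [] => false
  | denied :: rest =>
    if PySem.Str.endswith denied "*" then
      if tool_scopes.any (fun scope => PySem.Str.startswith scope (PySem.Str.slice denied none (some (-1)))) then
        true
      else scopeDeniedLoopA tool_scopes rest
    else
      if tool_scopes.contains denied then true
      else scopeDeniedLoopA tool_scopes rest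

def scope_is_denied_py (tool_scopes : List String) (denied_scopes : List String) : Bool :=
  scopeDeniedLoopA tool_scopes denied_scopes

-- ===== PORT B =====
def scope_is_denied_py_alt (tool_scopes : List String) (denied_scopes : List String) : Bool :=
  let exact : PySem.Set String :=
    PySem.Set.ofList (denied_scopes.filter (fun d => !(PySem.Str.endswith d "*")))
  let prefixes : List String :=
    (denied_scopes.filter (fun d => PySem.Str.endswith d "*")).map
      (fun d => PySem.Str.slice d none (some (-1)))
  -- s.startswith(prefixes) on a tuple = any prefix matches (exact to Python's tuple startswith)
  tool_scopes.any (fun s => PySem.Set.contains exact s || prefixes.any (fun p => PySem.Str.startswith s p))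

-- ===== PRECONDITION & SPEC =====
def Spec_scope_is_denied_py (tool_scopes : List String) (denied_scopes : List String) (out : Bool) : Prop := out = scope_is_denied_py_alt tool_scopes denied_scopes
instance (tool_scopes : List String) (denied_scopes : List String) (out : Bool) : Decidable (Spec_scope_is_denied_py tool_scopes denied_scopes out) := by unfold Spec_scope_is_denied_py; infer_instance

-- ===== CLAIM (what is proved, stated in full; the proofs are below) =====
def Claim_equal_scope_is_denied_py : Prop := ∀ (tool_scopes : List String) (denied_scopes : List String), Dom_scope_is_denied_py tool_scopes denied_scopes → Spec_scope_is_denied_py tool_scopes denied_scopes (scope_is_denied_py tool_scopes denied_scopes)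

-- ===== LEMMAS AND PROOFS =====

-- A's loop is an 'any' over the denials
theorem loopA_eq_any (ts : List String) (ds : List String) :
    scopeDeniedLoopA ts ds = ds.any (fun d =>
      if PySem.Str.endswith d "*" then
        ts.any (fun s => PySem.Str.startswith s (PySem.Str.slice d none (some (-1))))
      else ts.contains d) := by
  induction ds with
  | nil => rfl
  | cons d rest ih =>
    simp only [scopeDeniedLoopA, List.any_cons, ih]
    rcases Bool.eq_false_or_eq_true (PySem.Str.endswith d "*") with h1 | h1 <;>
    rcases Bool.eq_false_or_eq_true (ts.contains d) with h3 | h3 <;>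
    rcases Bool.eq_false_or_eq_true
      (ts.any fun s => PySem.Str.startswith s (PySem.Str.slice d none (some (-1)))) with h2 | h2 <;>
      simp_all [List.any_eq_true, List.any_eq_false] <;>
      (rw [Bool.eq_iff_iff]; simp_all [List.any_eq_true])

theorem main_eq (ts : List String) (ds : List String) :
    scope_is_denied_py ts ds = scope_is_denied_py_alt ts ds := by
  rw [scope_is_denied_py, loopA_eq_any, scope_is_denied_py_alt]
  rw [Bool.eq_iff_iff]
  simp only [List.any_eq_true, Bool.or_eq_true, PySem.Set.contains, List.mem_filter,
    List.mem_map, List.elem_eq_mem, decide_eq_true_eq, PySem.Set.mem_ofList]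
  constructor
  · rintro ⟨d, hd, hmatch⟩
    by_cases hw : PySem.Str.endswith d "*" = true
    · rw [if_pos hw] at hmatch
      simp only [List.any_eq_true] at hmatch
      obtain ⟨s, hs, hsp⟩ := hmatch
      exact ⟨s, hs, Or.inr ⟨_, ⟨d, ⟨hd, hw⟩, rfl⟩, hsp⟩⟩
    · rw [if_neg hw] at hmatch
      simp only [decide_eq_true_eq] at hmatch
      simp only [Bool.not_eq_true] at hw
      exact ⟨d, hmatch, Or.inl ⟨hd, by simpa using hw⟩⟩
  · rintro ⟨s, hs, hin | ⟨p, ⟨d, ⟨hd, hw⟩, rfl⟩, hsp⟩⟩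
    · obtain ⟨hsd, hnw⟩ := hin
      refine ⟨s, hsd, ?_⟩
      rw [if_neg (by simp at hnw ⊢; simp [hnw])]
      simp [hs]
    · refine ⟨d, hd, ?_⟩
      rw [if_pos hw]
      simp only [List.any_eq_true]
      exact ⟨s, hs, hsp⟩

-- ===== VERDICT (by name: the statement is the Claim_ definition above) =====
theorem scope_is_denied_py_spec : Claim_equal_scope_is_denied_py := by
  intro ts ds _
  unfold Spec_scope_is_denied_py
  exact main_eq ts ds
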